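-- pv_equiv track=rewrite | github.com/MassiFino/Progetto-APL | Python/utilis.py | assign_points_for_review
-- ===== SOURCE A (Python) =====
-- def assign_points_for_review(review_text: str) -> int:
--     """
--     Calcolo punti per recensione
--
--     - 10 punti base
--     - Bonus in base alla lunghezza del testo, usando soglie e comprensione.
--       Esempio:
--          >200 caratteri => +4
--          >100 caratteri => +2
--          (cumulabili se vuoi, o in ordine decrescente)
--     """
--
--     base_points = 10
--     text_len = len(review_text.strip())
--
--     # Lista di tuple (soglia, bonus).
--     # ATTENZIONE: se vuoi un "ordine" (prima 200, poi 100)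
--     # e NON cumulare i bonus, potresti dover gestire diversamente
--     thresholds_text_length = [
--         (200, 4),
--         (100, 2),
--     ]
--
--     # Esempio: sommi i bonus di tutte le soglie che superi => cumulabile
--     # Se invece vuoi che superare 200 dia SOLO +4, devi cambiare logica.
--     bonus_for_length = sum(bonus for limit, bonus in thresholds_text_length if text_len > limit)
--
--     points = base_points + bonus_for_length
--     return points
-- ===== SOURCE B (Python) =====
-- def assign_points_for_review(review_text: str) -> int:
--     text_len = len(review_text.strip())
--     if text_len > 200:
--         return 16
--     elif text_len > 100:
--         return 12
--     else:
--         return 10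
-- ===== Notes on version B (the rewrite author's own statement) =====
-- stated objective: simpler
-- what changed: Replaced the (threshold, bonus) table and the sum-over-comprehension by a direct conditional cascade returning the cumulative total (16/12/10) immediately.
import Mathlib
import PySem

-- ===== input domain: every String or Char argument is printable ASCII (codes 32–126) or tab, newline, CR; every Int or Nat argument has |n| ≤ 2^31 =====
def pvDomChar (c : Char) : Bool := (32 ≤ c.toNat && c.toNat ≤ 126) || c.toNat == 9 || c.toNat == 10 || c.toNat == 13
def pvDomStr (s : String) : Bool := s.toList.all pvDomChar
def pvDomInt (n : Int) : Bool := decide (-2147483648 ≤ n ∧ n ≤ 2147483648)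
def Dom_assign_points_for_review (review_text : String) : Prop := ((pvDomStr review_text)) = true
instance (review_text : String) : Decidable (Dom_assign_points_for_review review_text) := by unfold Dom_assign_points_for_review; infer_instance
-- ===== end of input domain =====

-- B replaces the threshold-table comprehension with a direct conditional cascade (objective: simpler).
-- ===== PORT A =====
def assign_points_for_review (review_text : String) : Int :=
  let base_points : Int := 10
  let text_len : Int := PySem.Str.len (PySem.Str.strip review_text)
  let thresholds_text_length : List (Int × Int) := [(200, 4), (100, 2)]
  let bonus_for_length : Int :=
    ((thresholds_text_length.filter (fun p => text_len > p.1)).map (fun p => p.2)).sum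
  let points := base_points + bonus_for_length
  points

-- ===== PORT B =====
def assign_points_for_review_alt (review_text : String) : Int :=
  let text_len : Int := PySem.Str.len (PySem.Str.strip review_text)
  if text_len > 200 then 16
  else if text_len > 100 then 12
  else 10

-- ===== PRECONDITION & SPEC =====
def Spec_assign_points_for_review (review_text : String) (out : Int) : Prop := out = assign_points_for_review_alt review_text
instance (review_text : String) (out : Int) : Decidable (Spec_assign_points_for_review review_text out) := by unfold Spec_assign_points_for_review; infer_instance

-- ===== CLAIM (what is proved, stated in full; the proofs are below) =====
def Claim_equal_assign_points_for_review : Prop := ∀ (review_text : String), Dom_assign_points_for_review review_text → Spec_assign_points_for_review review_text (assign_points_for_review review_text)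

-- ===== LEMMAS AND PROOFS =====

-- ===== VERDICT (by name: the statement is the Claim_ definition above) =====
theorem assign_points_for_review_spec : Claim_equal_assign_points_for_review := by
  intro review_text _
  unfold Spec_assign_points_for_review assign_points_for_review assign_points_for_review_alt
  generalize PySem.Str.len (PySem.Str.strip review_text) = n
  by_cases h1 : n > 200 <;> by_cases h2 : n > 100 <;>
    simp [List.filter, h1, h2] <;> omega
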